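-- pv_equiv track=rewrite | github.com/MartinSierraURL/Proyecto-Chomsky-Classifier-AI | analizador_gramatica.py | separar_simbolos
-- ===== SOURCE A (Python) =====
-- def separar_simbolos(cadena: str):
--     """Divide una cadena en simbolos terminales y no terminales."""
--     cadena = cadena.strip()
--     if ' ' in cadena:
--         return cadena.split()
--     else:
--         simbolos = []
--         i = 0
--         while i < len(cadena):
--             c = cadena[i]
--             if c.isupper():
--                 simbolos.append(c)
--                 i += 1
--             else:
--                 j = i
--                 while j < len(cadena) and not cadena[j].isupper():
--                     j += 1
--                 simbolos.append(cadena[i:j])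
--                 i = j
--         return [s for s in simbolos if s != '']
-- ===== SOURCE B (Python) =====
-- def separar_simbolos(cadena: str):
--     """Divide una cadena en simbolos terminales y no terminales."""
--     cadena = cadena.strip()
--     if ' ' in cadena:
--         return cadena.split()
--     res = []
--     buf = ''
--     for c in cadena:
--         if c.isupper():
--             if buf:
--                 res.append(buf)
--                 buf = ''
--             res.append(c)
--         else:
--             buf += c
--     if buf:
--         res.append(buf)
--     return res
-- ===== Notes on version B (the rewrite author's own statement) =====
-- stated objective: simpler
-- what changed: Replaces the index-seeking nested while loops plus trailing empty-string filter with a single flat pass over the characters maintaining a lowercase-run buffer flushed at each uppercase letter; no indices, no inner scan, no final filter (constant-factor win: one traversal, no slicing/indexing overhead).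
import Mathlib
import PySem

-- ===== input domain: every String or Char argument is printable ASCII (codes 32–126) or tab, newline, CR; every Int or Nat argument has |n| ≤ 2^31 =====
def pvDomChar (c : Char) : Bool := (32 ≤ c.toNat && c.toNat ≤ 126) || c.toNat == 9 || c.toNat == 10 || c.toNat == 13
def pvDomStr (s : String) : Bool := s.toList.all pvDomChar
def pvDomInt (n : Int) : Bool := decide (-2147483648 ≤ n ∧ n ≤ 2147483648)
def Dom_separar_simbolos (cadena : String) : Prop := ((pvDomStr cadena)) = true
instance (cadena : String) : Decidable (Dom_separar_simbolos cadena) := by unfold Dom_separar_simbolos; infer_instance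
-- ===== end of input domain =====

-- B replaces A's index-seeking nested while loops and final empty-string filter by a
-- single flat pass with a run buffer (objective: simpler).

-- ===== PORT A =====
-- inner 'while j < len(cadena) and not cadena[j].isupper(): j += 1' starting at j
def pvSeekA (l : List Char) (j : Nat) : Nat :=
  if h : j < l.length then
    if !(PySem.Chars.isupper l[j]) then pvSeekA l (j + 1) else j
  else j
termination_by l.length - j

-- pvSeekA never moves backwards (needed for the outer loop's termination)
theorem pvSeekA_ge (l : List Char) (j : Nat) : j ≤ pvSeekA l j := by
  unfold pvSeekA
  split
  · split
    · have := pvSeekA_ge l (j + 1); omega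
    · exact le_refl j
  · exact le_refl j
termination_by l.length - j

-- outer 'while i < len(cadena)' loop of A, accumulating 'simbolos'
def pvLoopA (l : List Char) (i : Nat) (acc : List (List Char)) : List (List Char) :=
  if h : i < l.length then
    if PySem.Chars.isupper l[i] then
      pvLoopA l (i + 1) (acc ++ [[l[i]]])
    else
      let j := pvSeekA l i
      pvLoopA l j (acc ++ [(l.drop i).take (j - i)])   -- cadena[i:j], exact for 0 ≤ i ≤ j
  else acc
termination_by l.length - i
decreasing_by
  · omega
  · have h1 : i + 1 ≤ pvSeekA l (i + 1) := pvSeekA_ge l (i + 1)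
    have h3 : pvSeekA l i = pvSeekA l (i + 1) := by
      rw [pvSeekA]; simp_all
    omega

def separar_simbolos (cadena : String) : List String :=
  let s := PySem.Str.strip cadena
  if PySem.Str.isIn " " s then
    PySem.Str.split₀ s
  else
    ((pvLoopA s.toList 0 []).filter (fun t => t ≠ [])).map String.ofList

-- ===== PORT B =====
-- single pass: flush 'buf' before each uppercase char and at the end
def pvLoopB (l : List Char) (buf : List Char) (acc : List String) : List String :=
  match l with
  | [] => if buf ≠ [] then acc ++ [String.ofList buf] else acc
  | c :: rest =>
    if PySem.Chars.isupper c then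
      pvLoopB rest []
        ((if buf ≠ [] then acc ++ [String.ofList buf] else acc) ++ [String.ofList [c]])
    else
      pvLoopB rest (buf ++ [c]) acc

def separar_simbolos_alt (cadena : String) : List String :=
  let s := PySem.Str.strip cadena
  if PySem.Str.isIn " " s then
    PySem.Str.split₀ s
  else
    pvLoopB s.toList [] []

-- ===== PRECONDITION & SPEC =====
def Spec_separar_simbolos (cadena : String) (out : List String) : Prop := out = separar_simbolos_alt cadena
instance (cadena : String) (out : List String) : Decidable (Spec_separar_simbolos cadena out) := by unfold Spec_separar_simbolos; infer_instance

-- ===== CLAIM (what is proved, stated in full; the proofs are below) =====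
def Claim_equal_separar_simbolos : Prop := ∀ (cadena : String), Dom_separar_simbolos cadena → Spec_separar_simbolos cadena (separar_simbolos cadena)

-- ===== LEMMAS AND PROOFS =====

-- common reference decomposition: maximal non-uppercase runs, single uppercase chars
def pvGroups (l : List Char) : List (List Char) :=
  match l with
  | [] => []
  | c :: rest =>
    if PySem.Chars.isupper c then
      [c] :: pvGroups rest
    else
      (c :: rest.takeWhile (fun d => !PySem.Chars.isupper d)) ::
        pvGroups (rest.dropWhile (fun d => !PySem.Chars.isupper d))
termination_by l.length
decreasing_by
  · simp
  · have := List.length_dropWhile_le (p := fun d => !PySem.Chars.isupper d) (l := rest)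
    simp; omega

theorem pvSeekA_eq (l : List Char) (j : Nat) :
    pvSeekA l j = j + ((l.drop j).takeWhile (fun d => !PySem.Chars.isupper d)).length := by
  unfold pvSeekA
  split
  · rename_i h
    rw [List.drop_eq_getElem_cons h]
    by_cases hu : PySem.Chars.isupper l[j]
    · simp only [hu, Bool.not_true, if_neg, Bool.false_eq_true, not_false_iff]
      rw [List.takeWhile_cons]
      simp [hu]
    · have hu' : PySem.Chars.isupper l[j] = false := by simpa using hu
      simp only [hu', Bool.not_false, if_pos]
      rw [pvSeekA_eq l (j + 1), List.takeWhile_cons]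
      simp [hu']
      omega
  · rename_i h
    rw [List.drop_eq_nil_of_le (by omega)]
    simp
termination_by l.length - j

theorem pvTakeLenTakeWhile {α : Type} (p : α → Bool) (l : List α) :
    l.take ((l.takeWhile p).length) = l.takeWhile p := by
  induction l with
  | nil => simp
  | cons x xs ih =>
    by_cases hx : p x
    · simp [List.takeWhile_cons, hx, ih]
    · simp [List.takeWhile_cons, hx]

theorem pvDropLenTakeWhile {α : Type} (p : α → Bool) (l : List α) :
    l.drop ((l.takeWhile p).length) = l.dropWhile p := by
  induction l with
  | nil => simp
  | cons x xs ih =>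
    by_cases hx : p x
    · simp [List.takeWhile_cons, List.dropWhile_cons, hx, ih]
    · simp [List.takeWhile_cons, List.dropWhile_cons, hx]

theorem pvLoopA_eq (l : List Char) (i : Nat) (acc : List (List Char)) :
    pvLoopA l i acc = acc ++ pvGroups (l.drop i) := by
  unfold pvLoopA
  split
  · rename_i h
    have hd : l.drop i = l[i] :: l.drop (i + 1) := List.drop_eq_getElem_cons h
    split
    · rename_i hu
      rw [pvLoopA_eq l (i + 1)]
      conv_rhs => rw [hd]
      rw [pvGroups]
      simp [hu]
    · rename_i hu
      have hu' : PySem.Chars.isupper l[i] = false := by simpa using hu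
      rw [pvLoopA_eq l (pvSeekA l i)]
      have hs := pvSeekA_eq l i
      -- the slice cadena[i:j] is exactly the takeWhile prefix
      have htake : (l.drop i).take (pvSeekA l i - i) =
          (l.drop i).takeWhile (fun d => !PySem.Chars.isupper d) := by
        rw [hs, Nat.add_sub_cancel_left, pvTakeLenTakeWhile]
      -- the rest from j is exactly the dropWhile suffix
      have hdropw : l.drop (pvSeekA l i) = (l.drop i).dropWhile (fun d => !PySem.Chars.isupper d) := by
        rw [hs, ← List.drop_drop, pvDropLenTakeWhile]
      conv_rhs => rw [hd]
      rw [pvGroups]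
      simp only [hu', Bool.false_eq_true, if_neg, not_false_iff]
      rw [htake, hdropw]
      conv_lhs => rw [hd]
      rw [List.takeWhile_cons, List.dropWhile_cons]
      simp [hu']
  · rename_i h
    rw [List.drop_eq_nil_of_le (by omega)]
    simp [pvGroups]
termination_by l.length - i
decreasing_by
  all_goals first
    | omega
    | (have h1 := pvSeekA_ge l (i + 1)
       have h3 : pvSeekA l i = pvSeekA l (i + 1) := by
         rw [pvSeekA]; simp_all
       omega)

-- every group is nonempty, so A's trailing filter is the identity
theorem pvGroups_ne_nil (l : List Char) : ∀ t ∈ pvGroups l, t ≠ [] := by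
  intro t ht
  induction l using pvGroups.induct with
  | case1 => simp [pvGroups] at ht
  | case2 c rest hu ih =>
    rw [pvGroups, if_pos hu] at ht
    rcases List.mem_cons.mp ht with h | h
    · simp [h]
    · exact ih h
  | case3 c rest hu ih =>
    rw [pvGroups, if_neg hu] at ht
    rcases List.mem_cons.mp ht with h | h
    · simp [h]
    · exact ih h

theorem pvGroups_nonupper_append (buf : List Char) (c : Char) (rest : List Char)
    (hb : ∀ d ∈ buf, PySem.Chars.isupper d = false)
    (hc : PySem.Chars.isupper c = true) :
    pvGroups (buf ++ c :: rest) =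
      (if buf ≠ [] then [buf] else []) ++ [c] :: pvGroups rest := by
  match buf with
  | [] => simp [pvGroups, hc]
  | b :: bs =>
    rw [List.cons_append, pvGroups]
    have hbb : PySem.Chars.isupper b = false := hb b (by simp)
    rw [if_neg (by simp [hbb])]
    have hball : ∀ d ∈ bs, (fun d => !PySem.Chars.isupper d) d = true := by
      intro d hd; simp [hb d (by simp [hd])]
    have htw : (bs ++ c :: rest).takeWhile (fun d => !PySem.Chars.isupper d) = bs := by
      rw [List.takeWhile_append_of_pos hball, List.takeWhile_cons]
      simp [hc]
    have hdw : (bs ++ c :: rest).dropWhile (fun d => !PySem.Chars.isupper d) = c :: rest := by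
      rw [List.dropWhile_append_of_pos hball, List.dropWhile_cons]
      simp [hc]
    rw [htw, hdw, pvGroups]
    simp [hc]

theorem pvGroups_all_nonupper (buf : List Char)
    (hb : ∀ d ∈ buf, PySem.Chars.isupper d = false) :
    pvGroups buf = if buf ≠ [] then [buf] else [] := by
  match buf with
  | [] => simp [pvGroups]
  | b :: bs =>
    rw [pvGroups]
    have hbb : PySem.Chars.isupper b = false := hb b (by simp)
    rw [if_neg (by simp [hbb])]
    have htw : bs.takeWhile (fun d => !PySem.Chars.isupper d) = bs :=
      List.takeWhile_eq_self_iff.mpr (by intro d hd; simp [hb d (by simp [hd])])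
    have hdw : bs.dropWhile (fun d => !PySem.Chars.isupper d) = [] :=
      List.dropWhile_eq_nil_iff.mpr (by intro d hd; simp [hb d (by simp [hd])])
    rw [htw, hdw, pvGroups]
    simp

theorem pvLoopB_eq (l : List Char) (buf : List Char) (acc : List String)
    (hb : ∀ d ∈ buf, PySem.Chars.isupper d = false) :
    pvLoopB l buf acc = acc ++ (pvGroups (buf ++ l)).map String.ofList := by
  induction l generalizing buf acc with
  | nil =>
    rw [pvLoopB, List.append_nil, pvGroups_all_nonupper buf hb]
    split <;> simp
  | cons c rest ih =>
    rw [pvLoopB]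
    by_cases hc : PySem.Chars.isupper c = true
    · rw [if_pos hc, ih [] _ (by simp),
        pvGroups_nonupper_append buf c rest hb hc]
      split <;> simp
    · rw [if_neg (by simp [hc]), ih (buf ++ [c]) acc
        (by intro d hd; simp at hd; rcases hd with h | h
            · exact hb d h
            · simpa [h] using hc)]
      simp

-- ===== VERDICT (by name: the statement is the Claim_ definition above) =====
theorem separar_simbolos_spec : Claim_equal_separar_simbolos := by
  intro cadena _
  unfold Spec_separar_simbolos separar_simbolos separar_simbolos_alt
  by_cases h : PySem.Chars.isIn [' '] (PySem.Chars.strip cadena.toList) = true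
  · simp [h]
  · simp only [h]
    rw [pvLoopB_eq _ [] [] (by simp), pvLoopA_eq]
    simp only [List.drop_zero, List.nil_append]
    rw [List.filter_eq_self.mpr (by intro t ht; simpa using pvGroups_ne_nil _ t ht)]
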